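-- pv_equiv track=rewrite | github.com/ismayel-shekh/Health_care | app.py | filter_doctors_by_symptoms
-- ===== SOURCE A (Python) =====
-- def filter_doctors_by_symptoms(symptoms, all_doctors):
--     """Filter doctors based on detected symptom keywords."""
--     symptoms_lower = symptoms.lower()
--
--     specialization_keywords = {
--         "Cardiologist": ["chest pain", "heart", "cardiac", "palpitation", "arrhythmia", "breathlessness", "pressure"],
--         "Pulmonologist": ["cough", "breathing", "shortness", "breath", "lungs", "respiratory", "wheeze", "asthma"],
--         "General Physician": ["fever", "cold", "flu", "ache", "fatigue", "general", "illness", "sick"],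
--         "Neurologist": ["headache", "migraine", "dizziness", "vertigo", "seizure", "brain", "memory", "numbness"],
--         "Orthopedist": ["bone", "joint", "fracture", "sprain", "muscle", "pain", "back", "knee", "leg", "arm"],
--         "Gastroenterologist": ["stomach", "nausea", "vomiting", "diarrhea", "digestion", "stomach pain", "abdomen"],
--         "ENT Specialist": ["throat", "ear", "nose", "sore", "congestion", "sinus", "hearing"]
--     }
--
--     matched_specializations = set()
--     for spec, keywords in specialization_keywords.items():
--         if any(keyword in symptoms_lower for keyword in keywords):
--             matched_specializations.add(spec)
--
--     # Filter doctors by matched specializations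
--     if matched_specializations:
--         filtered = [doc for doc in all_doctors if doc["specialization"] in matched_specializations]
--         return filtered if filtered else all_doctors[:5]
--
--     # Return top 5 if no matches
--     return all_doctors[:5]
-- ===== SOURCE B (Python) =====
-- def filter_doctors_by_symptoms(symptoms, all_doctors):
--     """Filter doctors based on detected symptom keywords (single-pass version)."""
--     symptoms_lower = symptoms.lower()
--
--     specialization_keywords = {
--         "Cardiologist": ["chest pain", "heart", "cardiac", "palpitation", "arrhythmia", "breathlessness", "pressure"],
--         "Pulmonologist": ["cough", "breathing", "shortness", "breath", "lungs", "respiratory", "wheeze", "asthma"],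
--         "General Physician": ["fever", "cold", "flu", "ache", "fatigue", "general", "illness", "sick"],
--         "Neurologist": ["headache", "migraine", "dizziness", "vertigo", "seizure", "brain", "memory", "numbness"],
--         "Orthopedist": ["bone", "joint", "fracture", "sprain", "muscle", "pain", "back", "knee", "leg", "arm"],
--         "Gastroenterologist": ["stomach", "nausea", "vomiting", "diarrhea", "digestion", "stomach pain", "abdomen"],
--         "ENT Specialist": ["throat", "ear", "nose", "sore", "congestion", "sinus", "hearing"]
--     }
--
--     def relevant(doc):
--         keywords = specialization_keywords.get(doc.get("specialization"), [])
--         return any(kw in symptoms_lower for kw in keywords)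
--
--     filtered = [doc for doc in all_doctors if relevant(doc)]
--     return filtered if filtered else all_doctors[:5]
-- ===== Notes on version B (the rewrite author's own statement) =====
-- stated objective: simpler
-- what changed: Drops the two-phase structure (build the matched-specializations set, then filter against it): B filters all_doctors in a single pass, testing each doctor's own specialization's keyword list directly against the lowered symptoms, with the same non-empty-else-top-5 fallback.
import Mathlib
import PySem

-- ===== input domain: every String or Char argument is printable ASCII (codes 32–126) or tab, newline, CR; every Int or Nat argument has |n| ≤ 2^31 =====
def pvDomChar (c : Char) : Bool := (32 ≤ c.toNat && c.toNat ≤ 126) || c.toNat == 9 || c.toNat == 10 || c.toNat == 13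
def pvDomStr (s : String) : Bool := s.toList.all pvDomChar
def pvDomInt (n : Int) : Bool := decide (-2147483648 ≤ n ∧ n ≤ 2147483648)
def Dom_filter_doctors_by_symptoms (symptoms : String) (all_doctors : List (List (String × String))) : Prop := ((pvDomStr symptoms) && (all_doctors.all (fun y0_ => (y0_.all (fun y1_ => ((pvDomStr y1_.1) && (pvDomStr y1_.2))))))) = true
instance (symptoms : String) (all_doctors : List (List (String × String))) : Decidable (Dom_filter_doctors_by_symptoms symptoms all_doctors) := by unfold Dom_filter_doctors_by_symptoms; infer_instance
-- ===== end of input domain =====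

-- B fuses A's two phases (build matched-specializations set, then filter) into one filtering
-- pass that tests each doctor's own specialization's keywords directly; objective: simpler.

-- the fixed keyword table, shared verbatim by both Pythons
def pvKw : List (String × List String) :=
  [ ("Cardiologist", ["chest pain", "heart", "cardiac", "palpitation", "arrhythmia", "breathlessness", "pressure"]),
    ("Pulmonologist", ["cough", "breathing", "shortness", "breath", "lungs", "respiratory", "wheeze", "asthma"]),
    ("General Physician", ["fever", "cold", "flu", "ache", "fatigue", "general", "illness", "sick"]),
    ("Neurologist", ["headache", "migraine", "dizziness", "vertigo", "seizure", "brain", "memory", "numbness"]),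
    ("Orthopedist", ["bone", "joint", "fracture", "sprain", "muscle", "pain", "back", "knee", "leg", "arm"]),
    ("Gastroenterologist", ["stomach", "nausea", "vomiting", "diarrhea", "digestion", "stomach pain", "abdomen"]),
    ("ENT Specialist", ["throat", "ear", "nose", "sore", "congestion", "sinus", "hearing"]) ]

-- any(keyword in symptoms_lower for keyword in keywords)
def pvHit (sl : String) (kws : List String) : Bool := kws.any (fun kw => PySem.Str.isIn kw sl)

-- ===== PORT A =====
-- the matched_specializations set built by A's first loop
def pvMatched (sl : String) : PySem.Set String :=
  pvKw.foldl (fun acc p => if pvHit sl p.2 then PySem.Set.add acc p.1 else acc) PySem.Set.empty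

def filter_doctors_by_symptoms (symptoms : String) (all_doctors : List (List (String × String))) : List (List (String × String)) :=
  let symptoms_lower := PySem.Str.lower symptoms
  let matched := pvMatched symptoms_lower
  if matched ≠ [] then
    -- doc["specialization"]: KeyError (excluded by Pre_) is rendered as the default "",
    -- which is never a specialization name, so the doctor is dropped
    let filtered := all_doctors.filter
      (fun doc => PySem.Set.contains matched (PySem.Dict.getD (PySem.Dict.mk doc) "specialization" ""))
    if filtered ≠ [] then filtered else all_doctors.take 5
  else all_doctors.take 5

-- ===== PORT B =====
-- relevant(doc): keywords = specialization_keywords.get(doc.get("specialization"), []); any(kw in symptoms_lower …)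
-- doc.get returning None makes the outer .get miss, i.e. keywords = []
def pvRelevant (sl : String) (doc : List (String × String)) : Bool :=
  pvHit sl (match PySem.Dict.get? (PySem.Dict.mk doc) "specialization" with
            | some s => PySem.Dict.getD (PySem.Dict.mk pvKw) s []
            | none => [])

def filter_doctors_by_symptoms_alt (symptoms : String) (all_doctors : List (List (String × String))) : List (List (String × String)) :=
  let symptoms_lower := PySem.Str.lower symptoms
  let filtered := all_doctors.filter (pvRelevant symptoms_lower)
  if filtered ≠ [] then filtered else all_doctors.take 5

-- ===== PRECONDITION & SPEC =====
-- Pre_ excludes exactly the inputs where A raises KeyError: some keyword matches the lowered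
-- symptoms (so A reaches the filtering comprehension) while some doctor lacks "specialization".
def Pre_filter_doctors_by_symptoms (symptoms : String) (all_doctors : List (List (String × String))) : Prop :=
  (pvKw.any (fun p => pvHit (PySem.Str.lower symptoms) p.2)) = true →
    (all_doctors.all (fun doc => PySem.Dict.contains (PySem.Dict.mk doc) "specialization")) = true
instance (symptoms : String) (all_doctors : List (List (String × String))) : Decidable (Pre_filter_doctors_by_symptoms symptoms all_doctors) := by unfold Pre_filter_doctors_by_symptoms; infer_instance

def pvWitness_filter_doctors_by_symptoms : String × (List (List (String × String))) :=
  ("fever", [[("specialization", "General Physician"), ("name", "Dr. A")]])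

def Spec_filter_doctors_by_symptoms (symptoms : String) (all_doctors : List (List (String × String))) (out : List (List (String × String))) : Prop := out = filter_doctors_by_symptoms_alt symptoms all_doctors
instance (symptoms : String) (all_doctors : List (List (String × String))) (out : List (List (String × String))) : Decidable (Spec_filter_doctors_by_symptoms symptoms all_doctors out) := by unfold Spec_filter_doctors_by_symptoms; infer_instance

-- ===== CLAIM (what is proved, stated in full; the proofs are below) =====
def Claim_equal_filter_doctors_by_symptoms : Prop := ∀ (symptoms : String) (all_doctors : List (List (String × String))), Dom_filter_doctors_by_symptoms symptoms all_doctors → Pre_filter_doctors_by_symptoms symptoms all_doctors → Spec_filter_doctors_by_symptoms symptoms all_doctors (filter_doctors_by_symptoms symptoms all_doctors)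

-- ===== LEMMAS AND PROOFS =====

-- membership in A's foldl-built set, generically
lemma mem_foldl_add {α β : Type} [DecidableEq α] (q : α × β → Bool) (l : List (α × β)) (acc : List α) (s : α) :
    s ∈ l.foldl (fun acc p => if q p then PySem.Set.add acc p.1 else acc) acc ↔
      s ∈ acc ∨ ∃ p ∈ l, p.1 = s ∧ q p = true := by
  induction l generalizing acc with
  | nil => simp
  | cons hd tl ih =>
    simp only [List.foldl_cons, ih]
    by_cases h : q hd = true
    · simp only [h, if_pos, PySem.Set.mem_add]
      constructor
      · rintro (⟨h1 | h1⟩ | ⟨p, hp, h2, h3⟩)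
        · exact Or.inl h1
        · exact Or.inr ⟨hd, by simp, h1.symm, h⟩
        · exact Or.inr ⟨p, by simp [hp], h2, h3⟩
      · rintro (h1 | ⟨p, hp, h2, h3⟩)
        · exact Or.inl (Or.inl h1)
        · rcases List.mem_cons.mp hp with rfl | hp
          · exact Or.inl (Or.inr h2.symm)
          · exact Or.inr ⟨p, hp, h2, h3⟩
    · simp only [h, if_neg, Bool.false_eq_true, not_false_iff]
      constructor
      · rintro (h1 | ⟨p, hp, h2, h3⟩)
        · exact Or.inl h1
        · exact Or.inr ⟨p, by simp [hp], h2, h3⟩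
      · rintro (h1 | ⟨p, hp, h2, h3⟩)
        · exact Or.inl h1
        · rcases List.mem_cons.mp hp with rfl | hp
          · rw [h3] at h; simp at h
          · exact Or.inr ⟨p, hp, h2, h3⟩

-- first-match association lookup vs existential over the pair list (needs nodup keys)
lemma exists_assoc {ν : Type} (l : List (String × ν)) (hnd : (l.map Prod.fst).Nodup) (s : String) (f : ν → Bool) :
    (∃ p ∈ l, p.1 = s ∧ f p.2 = true) ↔ ∃ v, PySem.Dict.get? (PySem.Dict.mk l) s = some v ∧ f v = true := by
  induction l with
  | nil => simp [PySem.Dict.get?]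
  | cons hd tl ih =>
    rcases hd with ⟨k, v⟩
    rw [PySem.Dict.get?_mk_cons]
    simp only [List.map_cons, List.nodup_cons] at hnd
    by_cases hk : k = s
    · subst hk
      simp only [beq_self_eq_true, if_pos]
      constructor
      · rintro ⟨p, hp, h1, h2⟩
        rcases List.mem_cons.mp hp with rfl | hp
        · exact ⟨v, rfl, h2⟩
        · exact absurd (h1 ▸ List.mem_map_of_mem (f := Prod.fst) hp) hnd.1
      · rintro ⟨w, hw, h2⟩
        exact ⟨(k, v), by simp, rfl, by injection hw with hw; exact hw ▸ h2⟩
    · rw [if_neg (by simpa using hk)]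
      rw [← ih hnd.2]
      constructor
      · rintro ⟨p, hp, h1, h2⟩
        rcases List.mem_cons.mp hp with rfl | hp
        · exact absurd h1 hk
        · exact ⟨p, hp, h1, h2⟩
      · rintro ⟨p, hp, h1, h2⟩
        exact ⟨p, List.mem_cons_of_mem _ hp, h1, h2⟩

-- contains on the matched set equals B's lookup-then-match test
lemma contains_matched (sl : String) (s : String) :
    PySem.Set.contains (pvMatched sl) s = pvHit sl (PySem.Dict.getD (PySem.Dict.mk pvKw) s []) := by
  have hmem : s ∈ pvMatched sl ↔ ∃ p ∈ pvKw, p.1 = s ∧ pvHit sl p.2 = true := by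
    simpa [PySem.Set.empty] using
      mem_foldl_add (fun p => pvHit sl p.2) pvKw ([] : List String) s
  have hnd : (pvKw.map Prod.fst).Nodup := by decide
  have hmem2 : s ∈ pvMatched sl ↔ ∃ v, PySem.Dict.get? (PySem.Dict.mk pvKw) s = some v ∧ pvHit sl v = true :=
    hmem.trans (exists_assoc pvKw hnd s (pvHit sl))
  cases hget : PySem.Dict.get? (PySem.Dict.mk pvKw) s with
  | none =>
    simp only [PySem.Dict.getD, hget, Option.getD_none]
    have : PySem.Set.contains (pvMatched sl) s = false := by
      rw [Bool.eq_false_iff]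
      intro hc
      rcases hmem2.mp (by simpa [PySem.Set.contains] using hc) with ⟨v, hv, _⟩
      rw [hget] at hv
      simp at hv
    rw [this]; rfl
  | some kws =>
    simp only [PySem.Dict.getD, hget, Option.getD_some]
    cases hf : pvHit sl kws with
    | true =>
      have : s ∈ pvMatched sl := hmem2.mpr ⟨kws, hget, hf⟩
      simpa [PySem.Set.contains] using this
    | false =>
      rw [Bool.eq_false_iff]
      intro hc
      rcases hmem2.mp (by simpa [PySem.Set.contains] using hc) with ⟨v, hv, h2⟩
      rw [hget] at hv
      injection hv with hv
      rw [← hv] at h2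
      exact absurd h2 (by simp [hf])

-- the two per-doctor predicates agree on every doc
lemma pred_eq (sl : String) (doc : List (String × String)) :
    PySem.Set.contains (pvMatched sl) (PySem.Dict.getD (PySem.Dict.mk doc) "specialization" "") =
      pvRelevant sl doc := by
  unfold pvRelevant
  cases hget : PySem.Dict.get? (PySem.Dict.mk doc) "specialization" with
  | none =>
    simp only [PySem.Dict.getD, hget, Option.getD_none]
    rw [contains_matched]
    rfl
  | some s =>
    simp only [PySem.Dict.getD, hget, Option.getD_some]
    exact contains_matched sl s

-- if the matched set is empty, no doctor is relevant
lemma relevant_false_of_empty (sl : String) (h : pvMatched sl = []) (doc : List (String × String)) :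
    pvRelevant sl doc = false := by
  rw [← pred_eq, h]
  rfl

-- ===== VERDICT (by name: the statement is the Claim_ definition above) =====
theorem filter_doctors_by_symptoms_spec : Claim_equal_filter_doctors_by_symptoms := by
  intro symptoms all_doctors _ _
  unfold Spec_filter_doctors_by_symptoms filter_doctors_by_symptoms filter_doctors_by_symptoms_alt
  simp only []
  by_cases hm : pvMatched (PySem.Str.lower symptoms) = []
  · rw [if_neg (by simpa using hm)]
    rw [List.filter_eq_nil_iff.mpr (fun doc _ => by simp [relevant_false_of_empty _ hm doc])]
    simp
  · rw [if_pos hm]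
    have hf : all_doctors.filter
        (fun doc => PySem.Set.contains (pvMatched (PySem.Str.lower symptoms))
          (PySem.Dict.getD (PySem.Dict.mk doc) "specialization" "")) =
        all_doctors.filter (pvRelevant (PySem.Str.lower symptoms)) := by
      exact List.filter_congr (fun doc _ => pred_eq _ doc)
    rw [hf]
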